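-- pv_equiv track=rewrite | github.com/Shiko889/python-toy-problem | challenge2.py | solution
-- ===== SOURCE A (Python) =====
-- def digit_sum(num):
--     return sum(int(digit) for digit in str(num))
--
-- def solution(A):
--     digit_sums = {}
--     max_sum = -1
--     for num in A:
--         sum_of_digits = digit_sum(num)
--         if sum_of_digits in digit_sums:
--             max_sum = max(max_sum, num + digit_sums[sum_of_digits])
--             digit_sums[sum_of_digits] = max(num, digit_sums[sum_of_digits])
--         else:
--             digit_sums[sum_of_digits] = num
--     return max_sum
-- ===== SOURCE B (Python) =====
-- def digit_sum(num):
--     return sum(int(digit) for digit in str(num))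
--
-- def solution(A):
--     # pair-scan: for each element, compare against all earlier elements with
--     # the same digit sum; no dictionary of per-key maxima is maintained.
--     best = -1
--     seen = []
--     for x in A:
--         s = digit_sum(x)
--         for y in seen:
--             if digit_sum(y) == s:
--                 best = max(best, x + y)
--         seen.append(x)
--     return best
-- ===== Notes on version B (the rewrite author's own statement) =====
-- stated objective: alternative
-- what changed: Replaces A's single pass that maintains a dict of per-digit-sum running maxima by a dict-free two-level pair scan: each element is compared with every earlier element of equal digit sum and the best pair sum is kept.
import Mathlib
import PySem

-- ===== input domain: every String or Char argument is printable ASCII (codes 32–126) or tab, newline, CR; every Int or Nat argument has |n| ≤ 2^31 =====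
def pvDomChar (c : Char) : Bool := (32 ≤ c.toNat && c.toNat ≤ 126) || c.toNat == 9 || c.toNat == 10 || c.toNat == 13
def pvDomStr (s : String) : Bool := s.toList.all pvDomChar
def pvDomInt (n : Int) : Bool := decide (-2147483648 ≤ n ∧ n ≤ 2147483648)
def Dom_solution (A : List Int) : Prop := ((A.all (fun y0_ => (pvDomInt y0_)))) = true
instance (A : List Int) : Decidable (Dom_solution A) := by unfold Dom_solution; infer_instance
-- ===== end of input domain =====

-- B replaces A's dict of per-digit-sum running maxima by a dict-free scan over all
-- earlier elements of equal digit sum (alternative decomposition, not faster).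

-- ===== PORT A =====
-- digit_sum(num) = sum(int(digit) for digit in str(num)); shared by A and B (B keeps it verbatim).
-- '.getD 0' is only a totalizer: under Pre_solution every element is ≥ 0, so str(num)
-- consists of digits only and int(digit) never raises (ofChars? is some).
def digitSum (num : Int) : Int :=
  (PySem.Int.toChars num).foldl (fun acc c => acc + (PySem.Int.ofChars? [c]).getD 0) 0

def solutionLoop (d : PySem.Dict Int Int) (m : Int) : List Int → Int
  | [] => m
  | num :: rest =>
    let s := digitSum num
    match d.get? s with
    | some v => solutionLoop (d.insert s (max num v)) (max m (num + v)) rest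
    | none   => solutionLoop (d.insert s num) m rest

def solution (A : List Int) : Int := solutionLoop PySem.Dict.empty (-1) A

-- ===== PORT B =====
def altInner (x s m : Int) (seen : List Int) : Int :=
  seen.foldl (fun m' y => if digitSum y == s then max m' (x + y) else m') m

def altLoop (seen : List Int) (m : Int) : List Int → Int
  | [] => m
  | x :: rest => altLoop (seen ++ [x]) (altInner x (digitSum x) m seen) rest

def solution_alt (A : List Int) : Int := altLoop [] (-1) A

-- ===== PRECONDITION & SPEC =====
-- Pre_ excludes lists containing a negative element: there digit_sum hits int('-') and
-- BOTH A and B raise ValueError (no value is returned by either).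
def Pre_solution (A : List Int) : Prop := ∀ x ∈ A, 0 ≤ x
instance (A : List Int) : Decidable (Pre_solution A) := by unfold Pre_solution; infer_instance
def pvWitness_solution : List Int := [12, 21, 3, 30]

def Spec_solution (A : List Int) (out : Int) : Prop := out = solution_alt A
instance (A : List Int) (out : Int) : Decidable (Spec_solution A out) := by unfold Spec_solution; infer_instance

-- ===== CLAIM (what is proved, stated in full; the proofs are below) =====
def Claim_equal_solution : Prop := ∀ (A : List Int), Dom_solution A → Pre_solution A → Spec_solution A (solution A)

-- ===== LEMMAS AND PROOFS =====

-- max of a nonempty group, as A's dict stores it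
def gmax : List Int → Option Int
  | [] => none
  | a :: t => some (t.foldl max a)

theorem foldl_max_add (x : Int) : ∀ (t : List Int) (m a : Int),
    t.foldl (fun m' y => max m' (x + y)) (max m (x + a)) = max m (x + t.foldl max a) := by
  intro t
  induction t with
  | nil => intro m a; simp
  | cons z t ih =>
    intro m a
    have h : max (max m (x + a)) (x + z) = max m (x + max a z) := by omega
    simp only [List.foldl_cons, h, ih]

theorem foldl_max_gmax (x : Int) (l : List Int) (m : Int) :
    l.foldl (fun m' y => max m' (x + y)) m
      = match gmax l with | none => m | some v => max m (x + v) := by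
  cases l with
  | nil => simp [gmax]
  | cons a t =>
    simp only [List.foldl_cons, gmax]
    have := foldl_max_add x t m a
    simpa using this

theorem altInner_eq (x s m : Int) (seen : List Int) :
    altInner x s m seen
      = match gmax (seen.filter (fun y => digitSum y == s)) with
        | none => m | some v => max m (x + v) := by
  unfold altInner
  rw [← List.foldl_filter]
  exact foldl_max_gmax x _ m

theorem gmax_append_singleton (l : List Int) (x : Int) :
    gmax (l ++ [x]) = some (match gmax l with | none => x | some v => max v x) := by
  cases l with
  | nil => simp [gmax]
  | cons a t => simp [gmax, List.foldl_append]

theorem loop_eq : ∀ (rest seen : List Int) (d : PySem.Dict Int Int) (m : Int),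
    (∀ s, d.get? s = gmax (seen.filter (fun y => digitSum y == s))) →
    solutionLoop d m rest = altLoop seen m rest := by
  intro rest
  induction rest with
  | nil => intro seen d m _; rfl
  | cons x rest ih =>
    intro seen d m hinv
    have hx := hinv (digitSum x)
    have hinv' : ∀ (w : Int), ∀ s,
        (d.insert (digitSum x) w).get? s
          = gmax ((seen ++ [x]).filter (fun y => digitSum y == s))
          ∨ s = digitSum x := by
      intro w s
      by_cases hs : s = digitSum x
      · right; exact hs
      · left
        rw [PySem.Dict.get?_insert]
        have hne : (digitSum x == s) = false := by
          simp [BEq.beq]; omega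
        simp [hs, List.filter_append, hne, hinv s]
    simp only [solutionLoop, altLoop, altInner_eq x (digitSum x) m seen, ← hx]
    cases hget : d.get? (digitSum x) with
    | none =>
      simp only []
      apply ih
      intro s
      rcases hinv' x s with h | h
      · exact h
      · subst h
        rw [PySem.Dict.get?_insert]
        have : seen.filter (fun y => digitSum y == digitSum x) = [] := by
          have := hinv (digitSum x)
          rw [hget] at this
          cases hf : seen.filter (fun y => digitSum y == digitSum x) with
          | nil => rfl
          | cons a t => rw [hf] at this; simp [gmax] at this
        simp [List.filter_append, this, gmax]
    | some v =>
      simp only []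
      apply ih
      intro s
      rcases hinv' (max x v) s with h | h
      · exact h
      · subst h
        rw [PySem.Dict.get?_insert, if_pos rfl]
        have hv := hinv (digitSum x); rw [hget] at hv
        have hT : List.filter (fun y => digitSum y == digitSum x) [x] = [x] := by simp
        rw [List.filter_append, hT, gmax_append_singleton, ← hv]
        simp [max_comm]

-- ===== VERDICT (by name: the statement is the Claim_ definition above) =====
theorem solution_spec : Claim_equal_solution := by
  intro A _ _
  unfold Spec_solution solution solution_alt
  apply loop_eq
  intro s
  simp [PySem.Dict.get?_empty, gmax]
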